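-- pv_equiv track=rewrite | github.com/LEEGURTS/LeetCode | 316-remove-duplicate-letters/316-remove-duplicate-letters.py | removeDuplicateLetters
-- ===== SOURCE A (Python) =====
-- import collections
--
-- def removeDuplicateLetters(s: str) -> str:
--     count, seen, stack = collections.Counter(s), set(), []
--     for char in s:
--         count[char] -= 1
--         if char in seen:
--             continue
--         while stack and count[stack[-1]] > 0 and char < stack[-1]:
--             seen.remove(stack.pop())
--         stack.append(char)
--         seen.add(char)
--     return "".join(stack)
-- ===== SOURCE B (Python) =====
-- def removeDuplicateLetters(s: str) -> str:
--     if not s: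
--         return ""
--     last = {c: i for i, c in enumerate(s)}
--     pos = 0
--     for i, c in enumerate(s):
--         if c < s[pos]:
--             pos = i
--         if last[c] == i:
--             break
--     c = s[pos]
--     rest = "".join(ch for ch in s[pos + 1:] if ch != c)
--     return c + removeDuplicateLetters(rest)
-- ===== Notes on version B (the rewrite author's own statement) =====
-- stated objective: alternative
-- what changed: Replaced the monotonic-stack scan with mutable counter and seen-set by a recursive pick-smallest strategy: precompute last-occurrence indices, scan only up to the first index that is the last occurrence of its character, pick the smallest character seen, emit it and recurse on the remainder with that character removed.
import Mathlib
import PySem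

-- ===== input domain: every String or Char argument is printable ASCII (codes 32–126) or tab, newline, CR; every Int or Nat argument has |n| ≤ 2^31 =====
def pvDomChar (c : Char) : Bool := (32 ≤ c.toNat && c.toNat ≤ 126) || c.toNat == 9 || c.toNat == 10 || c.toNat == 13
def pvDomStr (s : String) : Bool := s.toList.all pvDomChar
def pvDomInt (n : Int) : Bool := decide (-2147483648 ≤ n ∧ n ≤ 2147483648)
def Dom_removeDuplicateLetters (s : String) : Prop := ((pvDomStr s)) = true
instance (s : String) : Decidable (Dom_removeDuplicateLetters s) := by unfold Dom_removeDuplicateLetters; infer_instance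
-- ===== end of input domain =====

-- B replaces A's counter/seen-set monotonic stack by a recursive pick-smallest-then-restrict strategy
-- (precomputed last-occurrence dict, bounded scan, recursion on the filtered remainder); alternative
-- decomposition, similar cost.

-- ===== PORT A =====

-- the while loop: 'while stack and count[stack[-1]] > 0 and char < stack[-1]: seen.remove(stack.pop())'
-- (the popped element is always a member of seen here, so Set.discard is exact for seen.remove)
def pvPopA (count : PySem.Dict Char Int) (ch : Char) (seen : PySem.Set Char) (stack : List Char) :
    PySem.Set Char × List Char :=
  if h : stack ≠ [] then
    if count.getD (stack.getLast h) 0 > 0 ∧ ch < stack.getLast h then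
      pvPopA count ch (PySem.Set.discard seen (stack.getLast h)) stack.dropLast
    else (seen, stack)
  else (seen, stack)
termination_by stack.length
decreasing_by
  simp [List.length_dropLast]
  cases stack with
  | nil => exact absurd rfl h
  | cons x xs => simp

def removeDuplicateLetters (s : String) : String :=
  let fin := s.toList.foldl (fun (st : PySem.Dict Char Int × PySem.Set Char × List Char) ch =>
      let count := st.1.modify ch 0 (· - 1)                     -- count[char] -= 1
      if PySem.Set.contains st.2.1 ch then (count, st.2.1, st.2.2)   -- if char in seen: continue
      else
        let ss := pvPopA count ch st.2.1 st.2.2                 -- the while loop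
        (count, PySem.Set.add ss.1 ch, ss.2 ++ [ch]))           -- stack.append(char); seen.add(char)
    (PySem.Dict.counter s.toList, PySem.Set.empty, [])
  String.ofList fin.2.2                                         -- "".join(stack)

-- ===== PORT B =====

-- last = {c: i for i, c in enumerate(s)}
def pvLastB (l : List Char) : PySem.Dict Char Int :=
  (PySem.List.enumerate l 0).foldl (fun d ic => d.insert ic.2 ic.1) PySem.Dict.empty

-- the for loop: 'for i, c in enumerate(s): if c < s[pos]: pos = i ; if last[c] == i: break'
-- (last[c] is always present, so getD is exact for the lookup)
def pvScanB (last : PySem.Dict Char Int) (l : List Char) : List (Int × Char) → Int → Int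
  | [], pos => pos
  | ic :: rest, pos =>
    let pos' := if ic.2 < PySem.List.pyGetD l pos ' ' then ic.1 else pos
    if last.getD ic.2 0 == ic.1 then pos' else pvScanB last l rest pos'

lemma pvScanB_nonneg (last : PySem.Dict Char Int) (l : List Char) :
    ∀ (e : List (Int × Char)) (pos : Int), 0 ≤ pos → (∀ p ∈ e, 0 ≤ p.1) →
      0 ≤ pvScanB last l e pos := by
  intro e
  induction e with
  | nil => intro pos h _; simpa [pvScanB] using h
  | cons ic rest ih =>
    intro pos h hm
    have h1 : 0 ≤ ic.1 := hm ic (by simp)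
    have h2 : 0 ≤ if ic.2 < PySem.List.pyGetD l pos ' ' then ic.1 else pos := by
      split <;> assumption
    simp only [pvScanB]
    split
    · exact h2
    · exact ih _ h2 (fun p hp => hm p (by simp [hp]))

lemma pvEnum_fst_nonneg (l : List Char) : ∀ p ∈ PySem.List.enumerate l 0, 0 ≤ p.1 := by
  intro p hp
  have := PySem.List.map_fst_enumerate l (0 : Int)
  have hmem : p.1 ∈ PySem.List.pyRange 0 (0 + l.length) 1 := by
    rw [← this]; exact List.mem_map_of_mem hp
  exact ((PySem.List.mem_pyRange_one).1 hmem).1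

def pvAltGo (l : List Char) : List Char :=
  if hl : l = [] then []                                        -- if not s: return ""
  else
    let pos := pvScanB (pvLastB l) l (PySem.List.enumerate l 0) 0
    let c := PySem.List.pyGetD l pos ' '                        -- c = s[pos]
    -- rest = "".join(ch for ch in s[pos+1:] if ch != c)
    let rest := (PySem.List.slice l (some (pos + 1)) none).filter (fun ch => ch ≠ c)
    c :: pvAltGo rest                                           -- c + removeDuplicateLetters(rest)
termination_by l.length
decreasing_by
  have h0 : 0 ≤ pvScanB (pvLastB l) l (PySem.List.enumerate l 0) 0 :=
    pvScanB_nonneg _ _ _ 0 le_rfl (pvEnum_fst_nonneg l)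
  have hs := PySem.List.slice_from l (a := pvScanB (pvLastB l) l (PySem.List.enumerate l 0) 0 + 1) (by omega)
  rw [hs]
  have h1 := List.length_filter_le (fun ch => decide (ch ≠ PySem.List.pyGetD l (pvScanB (pvLastB l) l (PySem.List.enumerate l 0) 0) ' '))
      (List.drop (pvScanB (pvLastB l) l (PySem.List.enumerate l 0) 0 + 1).toNat l)
  have h2 : (pvScanB (pvLastB l) l (PySem.List.enumerate l 0) 0 + 1).toNat ≥ 1 := by omega
  have h3 : (List.drop (pvScanB (pvLastB l) l (PySem.List.enumerate l 0) 0 + 1).toNat l).length = l.length - (pvScanB (pvLastB l) l (PySem.List.enumerate l 0) 0 + 1).toNat := List.length_drop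
  have h4 : l.length ≠ 0 := by simp [List.length_eq_zero_iff]; exact hl
  omega

def removeDuplicateLetters_alt (s : String) : String :=
  String.ofList (pvAltGo s.toList)

-- ===== PRECONDITION & SPEC =====
def Spec_removeDuplicateLetters (s : String) (out : String) : Prop := out = removeDuplicateLetters_alt s
instance (s : String) (out : String) : Decidable (Spec_removeDuplicateLetters s out) := by unfold Spec_removeDuplicateLetters; infer_instance

-- ===== CLAIM (what is proved, stated in full; the proofs are below) =====
def Claim_equal_removeDuplicateLetters : Prop := ∀ (s : String), Dom_removeDuplicateLetters s → Spec_removeDuplicateLetters s (removeDuplicateLetters s)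

-- ===== LEMMAS AND PROOFS =====

-- model: stack with HEAD = TOP
def popL (rest : List Char) (ch : Char) : List Char → List Char
  | [] => []
  | t :: st => if t ∈ rest ∧ ch < t then popL rest ch st else t :: st

def runL (suf : List Char) : List Char → List Char → List Char
  | [], st => st
  | ch :: rest, st =>
    if ch ∈ st then runL suf rest st
    else runL suf rest (ch :: popL (rest ++ suf) ch st)

lemma pop_subset {rest : List Char} {ch x : Char} : ∀ {st : List Char}, x ∈ popL rest ch st → x ∈ st := by
  intro st
  induction st with
  | nil => simp [popL]
  | cons t st ih =>
    simp only [popL]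
    split
    · intro h; exact List.mem_cons_of_mem _ (ih h)
    · exact id

lemma popL_all {rest : List Char} {ch : Char} : ∀ {st : List Char},
    (∀ x ∈ st, x ∈ rest ∧ ch < x) → popL rest ch st = [] := by
  intro st
  induction st with
  | nil => simp [popL]
  | cons t st ih =>
    intro h
    simp only [popL]
    rw [if_pos (h t (by simp))]
    exact ih (fun x hx => h x (by simp [hx]))

lemma pop_pass {rest : List Char} {ch c : Char} (hc : ¬(c ∈ rest ∧ ch < c)) :
    ∀ {F : List Char}, c ∉ F → popL rest ch (F ++ [c]) = popL rest ch F ++ [c] := by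
  intro F
  induction F with
  | nil => intro _; simp [popL, hc]
  | cons t F ih =>
    intro hF
    simp only [List.cons_append, popL]
    split
    · exact ih (fun h => hF (List.mem_cons_of_mem _ h))
    · simp

lemma pop_pass' {rest : List Char} {ch c : Char} :
    ∀ {F : List Char}, popL rest ch F ≠ [] → popL rest ch (F ++ [c]) = popL rest ch F ++ [c] := by
  intro F
  induction F with
  | nil => intro h; exact absurd rfl h
  | cons t F ih =>
    intro h
    simp only [List.cons_append, popL] at *
    split
    · rename_i hcond
      rw [if_pos hcond] at h
      exact ih h
    · simp

lemma pop_congr {ch : Char} {r1 r2 : List Char} : ∀ {F : List Char},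
    (∀ t ∈ F, (t ∈ r1 ↔ t ∈ r2)) → popL r1 ch F = popL r2 ch F := by
  intro F
  induction F with
  | nil => simp [popL]
  | cons t F ih =>
    intro h
    simp only [popL]
    have ht := h t (by simp)
    by_cases hc : t ∈ r1 ∧ ch < t
    · rw [if_pos hc, if_pos ⟨ht.1 hc.1, hc.2⟩]
      exact ih (fun x hx => h x (by simp [hx]))
    · rw [if_neg hc, if_neg (by rw [← ht] at *; exact hc)]

lemma pop_dead {rest : List Char} {ch d : Char} (hd : d ∉ rest) : ∀ {F : List Char}, d ∈ F →
    d ∈ popL rest ch F ∧ popL rest ch F ≠ [] := by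
  intro F
  induction F with
  | nil => simp
  | cons t F ih =>
    intro hmem
    simp only [popL]
    split
    · rename_i hc
      have htd : t ≠ d := fun h => hd (h ▸ hc.1)
      refine ih ?_
      rcases List.mem_cons.1 hmem with h | h
      · exact absurd h.symm htd
      · exact h
    · exact ⟨hmem, by simp⟩

lemma run_append (suf : List Char) : ∀ (u v st : List Char),
    runL suf (u ++ v) st = runL suf v (runL (v ++ suf) u st) := by
  intro u
  induction u with
  | nil => intro v st; simp [runL]
  | cons ch u ih =>
    intro v st
    simp only [List.cons_append, runL, List.append_assoc]
    split
    · exact ih v st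
    · exact ih v _

lemma run_subset {suf : List Char} {x : Char} : ∀ {pend st : List Char},
    x ∈ runL suf pend st → x ∈ st ∨ x ∈ pend := by
  intro pend
  induction pend with
  | nil => intro st h; exact Or.inl (by simpa [runL] using h)
  | cons ch rest ih =>
    intro st h
    simp only [runL] at h
    split at h
    · rcases ih h with h | h
      · exact Or.inl h
      · exact Or.inr (by simp [h])
    · rcases ih h with h | h
      · rcases List.mem_cons.1 h with h | h
        · exact Or.inr (by simp [h])
        · exact Or.inl (pop_subset h)
      · exact Or.inr (by simp [h])

lemma run_last_mem {suf : List Char} {a : Char} : ∀ {u st : List Char}, a ∈ runL suf (u ++ [a]) st := by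
  intro u st
  rw [run_append]
  simp only [runL]
  split
  · rename_i h; simpa using h
  · simp

lemma ph2_easy {c : Char} {suf : List Char} (hsuf : c ∉ suf) : ∀ {pend F : List Char}, c ∉ pend → c ∉ F →
    runL suf pend (F ++ [c]) = runL suf pend F ++ [c] := by
  intro pend
  induction pend with
  | nil => intro F _ _; simp [runL]
  | cons ch rest ih =>
    intro F hp hF
    have hch : ch ≠ c := fun h => hp (by simp [h])
    have hcr : c ∉ rest := fun h => hp (by simp [h])
    simp only [runL]
    by_cases hm : ch ∈ F
    · rw [if_pos (by simp [hm]), if_pos hm]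
      exact ih hcr hF
    · rw [if_neg (by simp [hm, hch]), if_neg hm]
      have hpc : ¬(c ∈ rest ++ suf ∧ ch < c) := fun h => (by
        rcases List.mem_append.1 h.1 with h' | h'
        exacts [hcr h', hsuf h'])
      rw [pop_pass hpc hF, ← List.cons_append]
      exact ih hcr (by
        intro h
        rcases List.mem_cons.1 h with h | h
        exacts [hch h.symm, hF (pop_subset h)])

lemma mem_filter_ne {c t : Char} {r : List Char} (ht : t ≠ c) :
    (t ∈ r.filter (fun x => x ≠ c)) ↔ t ∈ r := by
  simp [List.mem_filter, ht]

lemma ph2a {c : Char} : ∀ {pend F : List Char} {sufR : List Char},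
    (∀ ch ∈ pend, ¬ ch < c) → c ∉ F →
    runL sufR pend (F ++ [c]) =
      runL (sufR.filter (fun x => x ≠ c)) (pend.filter (fun x => x ≠ c)) F ++ [c] := by
  intro pend
  induction pend with
  | nil => intro F sufR _ _; simp [runL]
  | cons ch rest ih =>
    intro F sufR hge hF
    by_cases hch : ch = c
    · subst hch
      rw [List.filter_cons_of_neg (by simp)]
      simp only [runL]
      rw [if_pos (by simp)]
      exact ih (fun x hx => hge x (by simp [hx])) hF
    · rw [List.filter_cons_of_pos (by simp [hch])]
      simp only [runL]
      by_cases hm : ch ∈ F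
      · rw [if_pos (by simp [hm]), if_pos hm]
        exact ih (fun x hx => hge x (by simp [hx])) hF
      · rw [if_neg (by simp [hm, hch]), if_neg hm]
        have hpc : ¬(c ∈ rest ++ sufR ∧ ch < c) := fun h => hge ch (by simp) h.2
        rw [pop_pass hpc hF]
        have hcongr : popL (rest ++ sufR) ch F =
            popL (rest.filter (fun x => x ≠ c) ++ sufR.filter (fun x => x ≠ c)) ch F := by
          refine pop_congr (fun t htF => ?_)
          have htc : t ≠ c := fun h => hF (h ▸ htF)
          rw [← List.filter_append, mem_filter_ne htc]
        rw [← List.cons_append, hcongr]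
        exact ih (fun x hx => hge x (by simp [hx])) (by
          intro h
          rcases List.mem_cons.1 h with h | h
          exacts [hch h.symm, hF (pop_subset h)])

lemma ph2b {c d : Char} (hdc : d ≠ c) : ∀ {pend F : List Char},
    d ∈ F → d ∉ pend → c ∉ F →
    runL [] pend (F ++ [c]) = runL [] (pend.filter (fun x => x ≠ c)) F ++ [c] := by
  intro pend
  induction pend with
  | nil => intro F _ _ _; simp [runL]
  | cons ch rest ih =>
    intro F hdF hdp hcF
    have hdr : d ∉ rest := fun h => hdp (by simp [h])
    by_cases hch : ch = c
    · subst hch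
      rw [List.filter_cons_of_neg (by simp)]
      simp only [runL]
      rw [if_pos (by simp)]
      exact ih hdF hdr hcF
    · rw [List.filter_cons_of_pos (by simp [hch])]
      simp only [runL]
      by_cases hm : ch ∈ F
      · rw [if_pos (by simp [hm]), if_pos hm]
        exact ih hdF hdr hcF
      · rw [if_neg (by simp [hm, hch]), if_neg hm]
        simp only [List.append_nil]
        have hdead := pop_dead (ch := ch) (by simpa using hdr) hdF
        rw [pop_pass' hdead.2]
        have hcongr : popL rest ch F = popL (rest.filter (fun x => x ≠ c)) ch F := by
          refine pop_congr (fun t htF => ?_)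
          exact (mem_filter_ne (show t ≠ c from fun h => hcF (h ▸ htF))).symm
        rw [← List.cons_append, hcongr]
        exact ih (List.mem_cons_of_mem _ ((hcongr ▸ hdead).1)) hdr (by
          intro h
          rcases List.mem_cons.1 h with h | h
          exacts [hch h.symm, hcF (pop_subset h)])

-- first index that is the last occurrence of its character
def breakIdx : List Char → Nat
  | [] => 0
  | c :: t => if c ∈ t then breakIdx t + 1 else 0

-- position of the first occurrence of the minimum
def firstMinIdx : List Char → Nat
  | [] => 0
  | c :: t => if t = [] then 0 else (if t.getD (firstMinIdx t) ' ' < c then firstMinIdx t + 1 else 0)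

lemma breakIdx_lt : ∀ {l : List Char}, l ≠ [] → breakIdx l < l.length := by
  intro l
  induction l with
  | nil => simp
  | cons c t ih =>
    intro _
    simp only [breakIdx]
    split
    · rename_i h
      have := ih (List.ne_nil_of_mem h)
      simpa using this
    · simp

lemma breakIdx_last : ∀ {l : List Char}, l ≠ [] →
    l.getD (breakIdx l) ' ' ∉ l.drop (breakIdx l + 1) := by
  intro l
  induction l with
  | nil => simp
  | cons c t ih =>
    intro _
    simp only [breakIdx]
    split
    · rename_i h
      simpa using ih (List.ne_nil_of_mem h)
    · rename_i h
      simpa using h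

lemma breakIdx_min : ∀ {l : List Char}, ∀ i < breakIdx l, l.getD i ' ' ∈ l.drop (i + 1) := by
  intro l
  induction l with
  | nil => simp [breakIdx]
  | cons c t ih =>
    intro i hi
    simp only [breakIdx] at hi
    by_cases h : c ∈ t
    · rw [if_pos h] at hi
      cases i with
      | zero => simpa using h
      | succ i => simpa using ih i (by omega)
    · rw [if_neg h] at hi; omega

lemma firstMinIdx_lt : ∀ {l : List Char}, l ≠ [] → firstMinIdx l < l.length := by
  intro l
  induction l with
  | nil => simp
  | cons c t ih =>
    intro _
    simp only [firstMinIdx]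
    split
    · simp
    · rename_i h
      split
      · have := ih h; simpa using this
      · simp

lemma firstMinIdx_min : ∀ {l : List Char}, ∀ j < l.length,
    l.getD (firstMinIdx l) ' ' ≤ l.getD j ' ' := by
  intro l
  induction l with
  | nil => simp
  | cons c t ih =>
    intro j hj
    simp only [firstMinIdx]
    by_cases ht : t = []
    · subst ht
      have : j = 0 := by simpa using hj
      subst this
      simp
    · rw [if_neg ht]
      split
      · rename_i hlt
        cases j with
        | zero => simpa using le_of_lt hlt
        | succ j => simpa using ih j (by simpa using hj)
      · rename_i hlt
        cases j with
        | zero => simp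
        | succ j =>
          simp only [List.getD_cons_zero, List.getD_cons_succ]
          exact le_trans (le_of_not_gt hlt) (ih j (by simpa using hj))

lemma firstMinIdx_first : ∀ {l : List Char}, ∀ j < firstMinIdx l,
    l.getD (firstMinIdx l) ' ' < l.getD j ' ' := by
  intro l
  induction l with
  | nil => simp [firstMinIdx]
  | cons c t ih =>
    intro j hj
    simp only [firstMinIdx] at *
    by_cases ht : t = []
    · rw [if_pos ht] at hj; omega
    · rw [if_neg ht] at hj ⊢
      split
      · rename_i hlt
        rw [if_pos hlt] at hj
        cases j with
        | zero => simpa using hlt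
        | succ j => simpa using ih j (by omega)
      · rename_i hlt
        rw [if_neg hlt] at hj; omega

lemma firstMinIdx_append (a : Char) : ∀ (xs : List Char),
    firstMinIdx (xs ++ [a]) =
      if xs = [] then 0
      else if a < xs.getD (firstMinIdx xs) ' ' then xs.length else firstMinIdx xs := by
  intro xs
  induction xs with
  | nil => simp [firstMinIdx]
  | cons c t ih =>
    by_cases ht : t = []
    · subst ht
      simp [firstMinIdx]
    · have hfl := firstMinIdx_lt ht
      have htta : t ++ [a] ≠ [] := by simp
      rw [if_neg (by simp)]
      have hstep : firstMinIdx (c :: t ++ [a]) =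
          if (t ++ [a]).getD (firstMinIdx (t ++ [a])) ' ' < c then firstMinIdx (t ++ [a]) + 1 else 0 := by
        simp only [List.cons_append, firstMinIdx]
        rw [if_neg htta]
      rw [hstep, ih, if_neg ht]
      have hcons : firstMinIdx (c :: t) =
          if t.getD (firstMinIdx t) ' ' < c then firstMinIdx t + 1 else 0 := by
        simp only [firstMinIdx]
        rw [if_neg ht]
      rw [hcons]
      by_cases ha : a < t.getD (firstMinIdx t) ' '
      · rw [if_pos ha]
        have hv : (t ++ [a]).getD t.length ' ' = a := by simp
        rw [hv]
        by_cases hc : t.getD (firstMinIdx t) ' ' < c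
        · rw [if_pos hc]
          have hg : (c :: t).getD (firstMinIdx t + 1) ' ' = t.getD (firstMinIdx t) ' ' := rfl
          rw [hg, if_pos ha, if_pos (lt_trans ha hc)]
          simp
        · rw [if_neg hc]
          have hg : (c :: t).getD 0 ' ' = c := rfl
          rw [hg]
          by_cases hac : a < c
          · rw [if_pos hac, if_pos hac]; simp
          · rw [if_neg hac, if_neg hac]
      · rw [if_neg ha]
        have hv : (t ++ [a]).getD (firstMinIdx t) ' ' = t.getD (firstMinIdx t) ' ' := by
          rw [List.getD_append _ _ _ _ hfl]
        rw [hv]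
        by_cases hc : t.getD (firstMinIdx t) ' ' < c
        · rw [if_pos hc]
          have hg : (c :: t).getD (firstMinIdx t + 1) ' ' = t.getD (firstMinIdx t) ' ' := rfl
          rw [hg, if_neg ha]
        · rw [if_neg hc]
          have hg : (c :: t).getD 0 ' ' = c := rfl
          rw [hg, if_neg (fun hac => ha (lt_of_lt_of_le hac (le_of_not_gt hc)))]

lemma mem_drop_getD {l : List Char} {k j : Nat} (hk : k ≤ j) (hj : j < l.length) :
    l.getD j ' ' ∈ l.drop k := by
  rw [List.getD_eq_getElem _ _ hj]
  have hlt : j - k < (l.drop k).length := by simp; omega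
  have heq : (l.drop k)[j - k] = l[j] := by
    rw [List.getElem_drop]
    congr 1
    omega
  rw [← heq]
  exact List.getElem_mem hlt

lemma exists_idx_of_mem_drop {l : List Char} {k : Nat} {x : Char} (h : x ∈ l.drop k) :
    ∃ j, k ≤ j ∧ j < l.length ∧ l.getD j ' ' = x := by
  obtain ⟨i, hi, hx⟩ := List.getElem_of_mem h
  have hl : k + i < l.length := by have := hi; simp at this; omega
  refine ⟨k + i, by omega, hl, ?_⟩
  rw [List.getD_eq_getElem _ _ hl]
  rw [List.getElem_drop] at hx
  exact hx

lemma exists_idx_of_mem_take {l : List Char} {k : Nat} {x : Char} (h : x ∈ l.take k) :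
    ∃ j, j < k ∧ j < l.length ∧ l.getD j ' ' = x := by
  obtain ⟨j, hj, hx⟩ := List.mem_take_iff_getElem.1 h
  exact ⟨j, by omega, by omega, by rw [List.getD_eq_getElem _ _ (by omega)]; exact hx⟩

lemma getD_drop {l : List Char} {k i : Nat} (h : k + i < l.length) :
    (l.drop k).getD i ' ' = l.getD (k + i) ' ' := by
  rw [List.getD_eq_getElem _ _ (by simp; omega), List.getD_eq_getElem _ _ h, List.getElem_drop]

lemma occ_after (l : List Char) (L p : Nat) (hpL : p ≤ L)
    (hmid : ∀ i < L, l.getD i ' ' ∈ l.drop (i + 1))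
    (hfirst : ∀ j < p, l.getD p ' ' < l.getD j ' ') :
    ∀ j < p, l.getD j ' ' ∈ l.drop (p + 1) := by
  suffices h : ∀ n j, p - j ≤ n → j < p → l.getD j ' ' ∈ l.drop (p + 1) by
    intro j hj; exact h p j (by omega) hj
  intro n
  induction n with
  | zero => intro j h hj; omega
  | succ n ih =>
    intro j hn hj
    have hmem := hmid j (by omega)
    obtain ⟨j', hj'1, hj'2, hj'3⟩ := exists_idx_of_mem_drop hmem
    rcases lt_trichotomy j' p with h' | h' | h'
    · rw [← hj'3]; exact ih j' (by omega) h'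
    · subst h'
      exact absurd hj'3 (ne_of_lt (hfirst j hj))
    · rw [← hj'3]; exact mem_drop_getD (by omega) hj'2

lemma decomp (l : List Char) (L p : Nat) (c : Char)
    (hL : L < l.length) (hpL : p ≤ L) (hc : l.getD p ' ' = c)
    (hlast : ∀ j, L < j → j < l.length → l.getD j ' ' ≠ l.getD L ' ')
    (hmid : ∀ i < L, l.getD i ' ' ∈ l.drop (i + 1))
    (hmin : ∀ j ≤ L, j < l.length → c ≤ l.getD j ' ')
    (hfirst : ∀ j < p, c < l.getD j ' ') :
    runL [] l [] = runL [] ((l.drop (p + 1)).filter (fun x => x ≠ c)) [] ++ [c] := by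
  have hp : p < l.length := lt_of_le_of_lt hpL hL
  have hsplit : l.take p ++ (c :: l.drop (p + 1)) = l := by
    rw [← hc, List.getD_eq_getElem _ _ hp, List.getElem_cons_drop hp, List.take_append_drop]
  have h1 : runL [] l [] = runL [] (l.drop (p + 1)) [c] := by
    conv_lhs => rw [← hsplit]
    rw [run_append]
    set st1 := runL (c :: l.drop (p + 1) ++ []) (l.take p) [] with hst1def
    have hst1 : ∀ x ∈ st1, c < x ∧ x ∈ l.drop (p + 1) := by
      intro x hx
      rcases run_subset hx with h | h
      · simp at h
      · obtain ⟨j, hj1, hj2, hj3⟩ := exists_idx_of_mem_take h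
        constructor
        · rw [← hj3]; exact hfirst j hj1
        · rw [← hj3]
          exact occ_after l L p hpL hmid (by rw [hc]; exact hfirst) j hj1
    simp only [runL]
    rw [if_neg (fun h => absurd rfl (ne_of_gt (hst1 c h).1))]
    rw [popL_all (by
      intro x hx
      have := hst1 x hx
      simpa using ⟨this.2, this.1⟩)]
  rw [h1]
  by_cases hcin : c ∈ l.drop (p + 1)
  · have hpltL : p < L := by
      rcases Nat.lt_or_ge p L with h | h
      · exact h
      · exfalso
        have hpL' : p = L := by omega
        obtain ⟨j, hj1, hj2, hj3⟩ := exists_idx_of_mem_drop hcin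
        exact hlast j (by omega) hj2 (by rw [hj3, ← hpL', hc])
    set d1 := (l.drop (p + 1)).take (L - p) with hd1def
    set d2 := l.drop (L + 1) with hd2def
    have hlen1 : (l.drop (p + 1)).length = l.length - (p + 1) := by simp
    have hd1len : d1.length = L - p := by
      rw [hd1def, List.length_take]
      omega
    have hd12 : l.drop (p + 1) = d1 ++ d2 := by
      rw [hd1def, hd2def]
      have h2 : l.drop (L + 1) = List.drop (L - p) (l.drop (p + 1)) := by
        rw [List.drop_drop]
        congr 1
        omega
      rw [h2, List.take_append_drop]
    have hd1mem : ∀ ch ∈ d1, ¬ ch < c := by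
      intro ch hch
      obtain ⟨j, hj1, hj2, hj3⟩ := exists_idx_of_mem_take hch
      rw [getD_drop (by omega)] at hj3
      rw [← hj3]
      exact not_lt_of_ge (hmin (p + 1 + j) (by omega) (by omega))
    have hd2idx : ∀ x ∈ d2, ∃ j, L < j ∧ j < l.length ∧ l.getD j ' ' = x := by
      intro x hx
      obtain ⟨j, hj1, hj2, hj3⟩ := exists_idx_of_mem_drop (hd2def ▸ hx)
      exact ⟨j, by omega, hj2, hj3⟩
    rw [hd12, run_append]
    simp only [List.append_nil]
    have hph2a := ph2a (c := c) (pend := d1) (F := []) (sufR := d2) hd1mem (by simp)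
    simp only [List.nil_append] at hph2a
    rw [hph2a]
    set F1 := runL (d2.filter (fun x => x ≠ c)) (d1.filter (fun x => x ≠ c)) [] with hF1def
    have hcF1 : c ∉ F1 := by
      intro h
      rcases run_subset h with h | h
      · simp at h
      · simp [List.mem_filter] at h
    have hgoal2 : runL [] d2 (F1 ++ [c]) = runL [] (d2.filter (fun x => x ≠ c)) F1 ++ [c] := by
      by_cases hcd2 : c ∈ d2
      · set dd := l.getD L ' ' with hdddef
        have hddc : dd ≠ c := by
          obtain ⟨j, hj1, hj2, hj3⟩ := hd2idx c hcd2
          intro h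
          exact hlast j hj1 hj2 (hj3.trans h.symm)
        have hddd2 : dd ∉ d2 := by
          intro h
          obtain ⟨j, hj1, hj2, hj3⟩ := hd2idx dd h
          exact hlast j hj1 hj2 (by rw [hj3])
        have hd1ne : d1 ≠ [] := by
          intro h
          rw [h] at hd1len
          simp at hd1len
          omega
        have hd1pos : 0 < d1.length := by omega
        have hlastd1 : d1.getLast hd1ne = dd := by
          rw [List.getLast_eq_getElem, hdddef, List.getD_eq_getElem _ _ hL]
          calc d1[d1.length - 1]'(by omega)
              = (l.drop (p + 1))[d1.length - 1]'(by
                  rw [hlen1]; omega) := List.getElem_take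
            _ = l[(p + 1) + (d1.length - 1)]'(by omega) := List.getElem_drop
            _ = l[L]'hL := by congr 1; omega
        have hd1eq : d1.dropLast ++ [dd] = d1 := by
          rw [← hlastd1]
          exact List.dropLast_append_getLast hd1ne
        have hddF1 : dd ∈ F1 := by
          rw [hF1def, ← hd1eq, List.filter_append,
            List.filter_cons_of_pos (by simp [hddc]), List.filter_nil]
          exact run_last_mem
        exact ph2b hddc hddF1 hddd2 hcF1
      · have hfe : d2.filter (fun x => x ≠ c) = d2 := by
          rw [List.filter_eq_self]
          intro a ha
          simp
          exact fun h => hcd2 (h ▸ ha)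
        rw [hfe]
        exact ph2_easy (by simp) hcd2 hcF1
    rw [hgoal2]
    have hfresh : runL [] ((d1 ++ d2).filter (fun x => x ≠ c)) [] =
        runL [] (d2.filter (fun x => x ≠ c)) F1 := by
      rw [List.filter_append, run_append]
      simp only [List.append_nil]
      rfl
    rw [hfresh]
  · have hfe : (l.drop (p + 1)).filter (fun x => x ≠ c) = l.drop (p + 1) := by
      rw [List.filter_eq_self]
      intro a ha
      simp
      exact fun h => hcin (h ▸ ha)
    rw [hfe]
    have := ph2_easy (c := c) (suf := []) (by simp) hcin (by simp : c ∉ ([] : List Char))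
    simpa using this

lemma getD_take {l : List Char} {k i : Nat} (hi : i < k) (hl : i < l.length) :
    (l.take k).getD i ' ' = l.getD i ' ' := by
  rw [List.getD_eq_getElem _ _ (by simp; omega), List.getD_eq_getElem _ _ hl]
  exact List.getElem_take

lemma enumerate_append_singleton (a : Char) : ∀ (xs : List Char) (s : Int),
    PySem.List.enumerate (xs ++ [a]) s = PySem.List.enumerate xs s ++ [(s + xs.length, a)] := by
  intro xs
  induction xs with
  | nil => intro s; simp [PySem.List.enumerate_cons, PySem.List.enumerate_nil]
  | cons x xs ih =>
    intro s
    rw [List.cons_append, PySem.List.enumerate_cons, ih, PySem.List.enumerate_cons]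
    simp only [List.cons_append, List.length_cons]
    have hcast : s + 1 + (xs.length : Int) = s + (((xs.length : Nat) + 1 : Nat) : Int) := by push_cast; ring
    rw [hcast]

lemma lastB_getD : ∀ {l : List Char} {x : Char}, x ∈ l →
    ∃ k, k < l.length ∧ (pvLastB l).getD x 0 = (k : Int) ∧ l.getD k ' ' = x ∧
      x ∉ l.drop (k + 1) := by
  intro l
  induction l using List.reverseRecOn with
  | nil => simp
  | append_singleton ys a ih =>
    intro x hx
    have hfold : pvLastB (ys ++ [a]) = (pvLastB ys).insert a (ys.length : Int) := by
      unfold pvLastB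
      rw [enumerate_append_singleton, List.foldl_append]
      simp
    by_cases hxa : x = a
    · subst hxa
      refine ⟨ys.length, by simp, ?_, ?_, ?_⟩
      · rw [hfold, PySem.Dict.getD_insert_self]
      · rw [List.getD_eq_getElem _ _ (by simp)]
        exact List.getElem_concat_length rfl _
      · rw [List.drop_of_length_le (by simp)]
        simp
    · have hxys : x ∈ ys := by
        rcases List.mem_append.1 hx with h | h
        · exact h
        · simp at h; exact absurd h hxa
      obtain ⟨k, hk1, hk2, hk3, hk4⟩ := ih hxys
      refine ⟨k, by simp; omega, ?_, ?_, ?_⟩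
      · rw [hfold, PySem.Dict.getD_insert_of_ne _ _ _ hxa, hk2]
      · rw [List.getD_append _ _ _ _ hk1]
        exact hk3
      · rw [List.drop_append_of_le_length (by omega)]
        intro h
        rcases List.mem_append.1 h with h | h
        · exact hk4 h
        · simp at h; exact hxa h

lemma scan_go (l : List Char) (hl : l ≠ []) : ∀ (n k : Nat), l.length - k = n → k ≤ breakIdx l →
    pvScanB (pvLastB l) l (PySem.List.enumerate (l.drop k) (k : Int)) ((firstMinIdx (l.take k) : Nat) : Int) =
      ((firstMinIdx (l.take (breakIdx l + 1)) : Nat) : Int) := by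
  have hbL : breakIdx l < l.length := breakIdx_lt hl
  intro n
  induction n with
  | zero => intro k h1 h2; omega
  | succ n ih =>
    intro k h1 h2
    have hk : k < l.length := by omega
    have hdropk : l.drop k = l[k] :: l.drop (k + 1) := (List.getElem_cons_drop hk).symm
    rw [hdropk, PySem.List.enumerate_cons]
    simp only [pvScanB]
    have happ : l.take (k + 1) = l.take k ++ [l[k]] := by
      rw [← List.take_concat_get hk, List.concat_eq_append]
    have hposcast :
        (if l[k] < PySem.List.pyGetD l ((firstMinIdx (l.take k) : Nat) : Int) ' ' then ((k : Nat) : Int)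
          else ((firstMinIdx (l.take k) : Nat) : Int)) = ((firstMinIdx (l.take (k + 1)) : Nat) : Int) := by
      rw [PySem.List.pyGetD_natCast, happ, firstMinIdx_append]
      by_cases hk0 : l.take k = []
      · have hkz : k = 0 := by
          rcases List.take_eq_nil_iff.1 hk0 with h | h
          · exact h
          · exact absurd h hl
        subst hkz
        rw [if_pos hk0, hk0]
        rw [if_neg (by
          simp only [firstMinIdx]
          rw [List.getD_eq_getElem _ _ hk]
          exact lt_irrefl _)]
        simp [firstMinIdx]
      · rw [if_neg hk0]
        have htlen : (l.take k).length = k := by simp; omega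
        have hfmi_lt : firstMinIdx (l.take k) < k := by
          have h := firstMinIdx_lt hk0
          rw [htlen] at h
          exact h
        rw [getD_take hfmi_lt (by omega)]
        by_cases hcond : l[k] < l.getD (firstMinIdx (l.take k)) ' '
        · rw [if_pos hcond, if_pos hcond, htlen]
        · rw [if_neg hcond, if_neg hcond]
    rw [hposcast]
    have hmem : l[k] ∈ l := List.getElem_mem hk
    obtain ⟨k', hk'1, hk'2, hk'3, hk'4⟩ := lastB_getD hmem
    by_cases hbr : k = breakIdx l
    · have hkk' : k' = k := by
        rcases lt_trichotomy k' k with h | h | h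
        · exfalso
          have hmm := breakIdx_min (l := l) k' (by omega)
          rw [hk'3] at hmm
          exact hk'4 hmm
        · exact h
        · exfalso
          have hmm := mem_drop_getD (l := l) (k := k + 1) (j := k') (by omega) hk'1
          rw [hk'3] at hmm
          have hbl := breakIdx_last hl
          rw [← hbr, List.getD_eq_getElem _ _ hk] at hbl
          exact hbl hmm
      rw [hk'2, hkk']
      rw [if_pos (by simp)]
      rw [hbr]
    · have hlt : k < breakIdx l := by omega
      have hkk' : k' ≠ k := by
        intro h
        subst h
        have hmm := breakIdx_min k' hlt
        rw [List.getD_eq_getElem _ _ hk] at hmm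
        exact hk'4 hmm
      rw [hk'2]
      rw [if_neg (by
        simp only [beq_iff_eq]
        intro h
        exact hkk' (by exact_mod_cast h))]
      have hcast1 : ((k : Nat) : Int) + 1 = (((k + 1 : Nat) : Nat) : Int) := by push_cast; ring
      rw [hcast1]
      exact ih (k + 1) (by omega) (by omega)

lemma scan_eq (l : List Char) (hl : l ≠ []) :
    pvScanB (pvLastB l) l (PySem.List.enumerate l 0) 0 =
      ((firstMinIdx (l.take (breakIdx l + 1)) : Nat) : Int) := by
  have h := scan_go l hl l.length 0 (by omega) (by omega)
  simpa [firstMinIdx] using h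

lemma altGo_cons (l : List Char) (hl : l ≠ []) :
    pvAltGo l =
      l.getD (firstMinIdx (l.take (breakIdx l + 1))) ' ' ::
        pvAltGo ((l.drop (firstMinIdx (l.take (breakIdx l + 1)) + 1)).filter
          (fun x => x ≠ l.getD (firstMinIdx (l.take (breakIdx l + 1))) ' ')) := by
  rw [pvAltGo]
  rw [dif_neg hl, scan_eq l hl]
  simp only [PySem.List.pyGetD_natCast]
  have hcast : ((firstMinIdx (l.take (breakIdx l + 1)) : Nat) : Int) + 1 =
      ((firstMinIdx (l.take (breakIdx l + 1)) + 1 : Nat) : Int) := by push_cast; ring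
  rw [hcast, PySem.List.slice_from _ (by positivity), Int.toNat_natCast]

theorem ansA_eq_altGo : ∀ l : List Char, (runL [] l []).reverse = pvAltGo l := by
  suffices h : ∀ (n : Nat) (l : List Char), l.length ≤ n → (runL [] l []).reverse = pvAltGo l by
    intro l; exact h l.length l le_rfl
  intro n
  induction n with
  | zero =>
    intro l hn
    have hl : l = [] := by
      cases l with
      | nil => rfl
      | cons a t => simp at hn
    subst hl
    rw [pvAltGo]
    simp [runL]
  | succ n ih =>
    intro l hn
    by_cases hl : l = []
    · subst hl
      rw [pvAltGo]
      simp [runL]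
    · have hL : breakIdx l < l.length := breakIdx_lt hl
      have htne : l.take (breakIdx l + 1) ≠ [] := by
        intro h
        rcases List.take_eq_nil_iff.1 h with h' | h'
        · exact absurd h' (by omega)
        · exact hl h'
      have htlen : (l.take (breakIdx l + 1)).length = breakIdx l + 1 := by simp; omega
      have hpL : firstMinIdx (l.take (breakIdx l + 1)) ≤ breakIdx l := by
        have := firstMinIdx_lt htne
        rw [htlen] at this
        omega
      set L := breakIdx l with hLdef
      set p := firstMinIdx (l.take (L + 1)) with hpdef
      set c := l.getD p ' ' with hcdef
      have hdec := decomp l L p c hL hpL rfl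
        (by
          intro j hj1 hj2 heq
          have hmm := mem_drop_getD (l := l) (k := L + 1) (j := j) (by omega) hj2
          rw [heq] at hmm
          exact breakIdx_last hl hmm)
        (fun i hi => breakIdx_min i hi)
        (by
          intro j hj1 hj2
          have h := firstMinIdx_min (l := l.take (L + 1)) j (by rw [htlen]; omega)
          rw [getD_take (by omega) (by omega), getD_take (by omega) hj2] at h
          exact h)
        (by
          intro j hj
          have h := firstMinIdx_first (l := l.take (L + 1)) j hj
          rw [getD_take (by rw [htlen] at *; omega) (by omega),
            getD_take (by omega) (by omega)] at h
          exact h)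
      rw [hdec, List.reverse_append]
      simp only [List.reverse_cons, List.reverse_nil, List.nil_append, List.singleton_append]
      rw [altGo_cons l hl, ← hLdef, ← hpdef, ← hcdef]
      congr 1
      apply ih
      have h1 : ((l.drop (p + 1)).filter (fun x => x ≠ c)).length ≤ (l.drop (p + 1)).length :=
        List.length_filter_le _ _
      have h2 : (l.drop (p + 1)).length = l.length - (p + 1) := by simp
      omega

def stepA : (PySem.Dict Char Int × PySem.Set Char × List Char) → Char →
    (PySem.Dict Char Int × PySem.Set Char × List Char) :=
  fun st ch =>
    let count := st.1.modify ch 0 (· - 1)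
    if PySem.Set.contains st.2.1 ch then (count, st.2.1, st.2.2)
    else
      let ss := pvPopA count ch st.2.1 st.2.2
      (count, PySem.Set.add ss.1 ch, ss.2 ++ [ch])

lemma portA_eq (s : String) : removeDuplicateLetters s =
    String.ofList ((s.toList.foldl stepA
      (PySem.Dict.counter s.toList, PySem.Set.empty, [])).2.2) := rfl

lemma popA_bridge (ch : Char) (rest : List Char) (count : PySem.Dict Char Int)
    (hcount : ∀ x, count.getD x 0 = ((rest.count x : Nat) : Int)) :
    ∀ (stack : List Char) (seen : PySem.Set Char),
    (∀ x, x ∈ seen ↔ x ∈ stack) → stack.Nodup →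
    (pvPopA count ch seen stack).2 = (popL rest ch stack.reverse).reverse ∧
      (∀ x, x ∈ (pvPopA count ch seen stack).1 ↔ x ∈ (pvPopA count ch seen stack).2) ∧
      (pvPopA count ch seen stack).2.Nodup := by
  intro stack
  induction stack using List.reverseRecOn with
  | nil =>
    intro seen hseen _
    rw [pvPopA, dif_neg (not_not_intro rfl)]
    exact ⟨by simp [popL], fun x => by simpa using hseen x, by simp⟩
  | append_singleton ys t ih =>
    intro seen hseen hnd
    have hne : ys ++ [t] ≠ [] := by simp
    have hlast : (ys ++ [t]).getLast hne = t := List.getLast_concat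
    have hdrop : (ys ++ [t]).dropLast = ys := List.dropLast_concat
    have hrev : (ys ++ [t]).reverse = t :: ys.reverse := by simp
    have htys : t ∉ ys := by
      have h3 : (t :: ys.reverse).Nodup := by
        rw [← hrev]
        exact List.nodup_reverse.2 hnd
      intro h
      exact (List.nodup_cons.1 h3).1 (List.mem_reverse.2 h)
    rw [pvPopA, dif_pos hne]
    by_cases hcond : count.getD ((ys ++ [t]).getLast hne) 0 > 0 ∧ ch < (ys ++ [t]).getLast hne
    · rw [if_pos hcond]
      rw [hlast] at hcond
      have htrest : t ∈ rest := by
        have := hcond.1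
        rw [hcount t] at this
        have : 0 < rest.count t := by exact_mod_cast this
        exact List.count_pos_iff.1 this
      have hpop : popL rest ch (ys ++ [t]).reverse = popL rest ch ys.reverse := by
        rw [hrev]
        simp only [popL]
        rw [if_pos ⟨htrest, hcond.2⟩]
      rw [hpop, hlast, hdrop]
      refine ih (PySem.Set.discard seen t) ?_ ?_
      · intro x
        rw [PySem.Set.mem_discard]
        constructor
        · rintro ⟨hx, hxt⟩
          rcases List.mem_append.1 ((hseen x).1 hx) with h | h
          · exact h
          · simp at h; exact absurd h hxt
        · intro hx
          exact ⟨(hseen x).2 (List.mem_append.2 (Or.inl hx)), fun h => htys (h ▸ hx)⟩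
      · exact (List.nodup_append.1 hnd).1
    · rw [if_neg hcond]
      rw [hlast] at hcond
      refine ⟨?_, fun x => hseen x, hnd⟩
      rw [hrev]
      simp only [popL]
      rw [if_neg (by
        intro ⟨h1, h2⟩
        apply hcond
        refine ⟨?_, h2⟩
        rw [hcount t]
        exact_mod_cast List.count_pos_iff.2 h1)]
      simp

lemma bridgeA_go : ∀ (pend : List Char) (count : PySem.Dict Char Int) (seen : PySem.Set Char)
    (stack : List Char),
    (∀ x, count.getD x 0 = ((pend.count x : Nat) : Int)) →
    (∀ x, x ∈ seen ↔ x ∈ stack) →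
    stack.Nodup →
    (pend.foldl stepA (count, seen, stack)).2.2 = (runL [] pend stack.reverse).reverse := by
  intro pend
  induction pend with
  | nil =>
    intro count seen stack _ _ _
    simp [runL]
  | cons ch rest ih =>
    intro count seen stack hcount hseen hnd
    have hcount' : ∀ x, (count.modify ch 0 (· - 1)).getD x 0 = ((rest.count x : Nat) : Int) := by
      intro x
      by_cases hx : x = ch
      · rw [hx, PySem.Dict.getD_modify_self, hcount]
        have hcc : (ch :: rest).count ch = rest.count ch + 1 := List.count_cons_self
        rw [hcc]
        push_cast
        ring
      · rw [PySem.Dict.getD_modify_of_ne _ _ _ hx, hcount]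
        have hcc : (ch :: rest).count x = rest.count x := by
          simp [List.count_cons]
          exact fun h => absurd h.symm hx
        rw [hcc]
    by_cases hmem : ch ∈ stack
    · have hc : PySem.Set.contains seen ch = true := (PySem.Set.contains_iff _ _).2 ((hseen ch).2 hmem)
      rw [List.foldl_cons]
      show (rest.foldl stepA (stepA (count, seen, stack) ch)).2.2 = _
      simp only [stepA, hc, if_true]
      rw [runL, if_pos (by simpa using hmem)]
      exact ih _ seen stack hcount' hseen hnd
    · have hc : PySem.Set.contains seen ch = false := by
        rw [← Bool.not_eq_true, PySem.Set.contains_iff]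
        exact fun h => hmem ((hseen ch).1 h)
      obtain ⟨hb1, hb2, hb3⟩ := popA_bridge ch rest (count.modify ch 0 (· - 1)) hcount' stack seen hseen hnd
      set ss := pvPopA (count.modify ch 0 (· - 1)) ch seen stack with hssdef
      have hchss : ch ∉ ss.2 := by
        rw [hb1]
        intro h
        rw [List.mem_reverse] at h
        have := pop_subset h
        rw [List.mem_reverse] at this
        exact hmem this
      rw [List.foldl_cons]
      show (rest.foldl stepA (stepA (count, seen, stack) ch)).2.2 = _
      simp only [stepA, hc, Bool.false_eq_true, if_false]
      rw [runL, if_neg (by simpa using hmem)]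
      rw [List.append_nil]
      have hstack' : (ss.2 ++ [ch]).reverse = ch :: popL rest ch stack.reverse := by
        rw [hb1]
        simp
      rw [← hstack']
      apply ih
      · exact hcount'
      · intro x
        rw [PySem.Set.mem_add]
        constructor
        · rintro (h | h)
          · exact List.mem_append.2 (Or.inl ((hb2 x).1 h))
          · subst h; simp
        · intro h
          rcases List.mem_append.1 h with h | h
          · exact Or.inl ((hb2 x).2 h)
          · simp at h; exact Or.inr h
      · rw [List.nodup_append]
        refine ⟨hb3, List.nodup_singleton _, ?_⟩
        intro a ha b hbm
        rw [List.mem_singleton] at hbm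
        subst hbm
        exact fun h => hchss (h ▸ ha)

-- ===== VERDICT (by name: the statement is the Claim_ definition above) =====
theorem removeDuplicateLetters_spec : Claim_equal_removeDuplicateLetters := by
  intro s _
  show removeDuplicateLetters s = removeDuplicateLetters_alt s
  rw [portA_eq]
  have h := bridgeA_go s.toList (PySem.Dict.counter s.toList) PySem.Set.empty []
    (fun x => by rw [PySem.Dict.getD_counter]) (fun x => Iff.rfl) List.nodup_nil
  rw [List.reverse_nil] at h
  rw [h, ansA_eq_altGo]
  rfl
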